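-- pv_equiv track=rewrite | github.com/UVCHIKORITA/BIOprep | papers/1995/q1.py | stringToKey
-- ===== SOURCE A (Python) =====
-- def stringToKey(value):
--     acceptableCharsList = ['A', 'B', 'C', 'D', 'E', 'F', 'G', 'H', 'I', 'J', 'K', 'L', 'M', 'N', 'O', 'P', 'Q', 'R', 'S', 'T', 'U', 'V', 'W', 'X', 'Y', 'Z', ',', '.', ' ']
--     charsList = []
--     key = ""
--     for char in value:
--         if char in acceptableCharsList and char not in charsList:
--             key += char
--             charsList.append(char)
--     for char in acceptableCharsList:
--         if char not in charsList:
--             key += char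
--     return key
-- ===== SOURCE B (Python) =====
-- def stringToKey(value):
--     acceptableCharsList = ['A', 'B', 'C', 'D', 'E', 'F', 'G', 'H', 'I', 'J', 'K', 'L', 'M', 'N', 'O', 'P', 'Q', 'R', 'S', 'T', 'U', 'V', 'W', 'X', 'Y', 'Z', ',', '.', ' ']
--     firstIndex = {}
--     for i, char in enumerate(value):
--         if char in acceptableCharsList and char not in firstIndex:
--             firstIndex[char] = i
--     seen = sorted((c for c in acceptableCharsList if c in firstIndex),
--                   key=lambda c: firstIndex[c])
--     unseen = [c for c in acceptableCharsList if c not in firstIndex]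
--     return ''.join(seen + unseen)
-- ===== Notes on version B (the rewrite author's own statement) =====
-- stated objective: alternative
-- what changed: B replaces A's append-in-order accumulator (list membership scan per char) by a first-occurrence index dict built with enumerate, then reconstructs the seen part by sorting the acceptable alphabet by first index and appends the unseen rest; equivalence rests on sorting-by-strictly-increasing-first-index reproducing appearance order.
import Mathlib
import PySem

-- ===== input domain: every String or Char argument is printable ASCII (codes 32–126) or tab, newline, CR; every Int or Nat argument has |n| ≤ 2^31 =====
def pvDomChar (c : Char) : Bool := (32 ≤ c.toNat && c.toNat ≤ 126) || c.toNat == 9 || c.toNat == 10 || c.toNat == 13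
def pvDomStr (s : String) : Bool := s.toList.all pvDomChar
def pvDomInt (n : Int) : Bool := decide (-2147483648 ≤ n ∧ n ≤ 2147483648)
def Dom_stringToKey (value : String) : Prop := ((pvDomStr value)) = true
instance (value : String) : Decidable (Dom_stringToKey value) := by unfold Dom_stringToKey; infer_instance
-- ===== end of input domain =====

-- B rebuilds the seen prefix from a first-occurrence index dict plus a sort instead of A's
-- append-in-appearance-order accumulator; alternative decomposition, same results.

-- the literal acceptableCharsList of both Pythons
def pvACC : List Char :=
  ['A', 'B', 'C', 'D', 'E', 'F', 'G', 'H', 'I', 'J', 'K', 'L', 'M',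
   'N', 'O', 'P', 'Q', 'R', 'S', 'T', 'U', 'V', 'W', 'X', 'Y', 'Z', ',', '.', ' ']

-- ===== PORT A =====
-- state: (charsList, key); key kept as List Char, String.mk at the end (exact: only appends)
def stringToKey (value : String) : String :=
  let st := value.toList.foldl
    (fun (st : List Char × List Char) c =>
      if c ∈ pvACC ∧ c ∉ st.1 then (st.1 ++ [c], st.2 ++ [c]) else st)
    ([], [])
  String.mk (pvACC.foldl (fun k c => if c ∈ st.1 then k else k ++ [c]) st.2)

-- ===== PORT B =====
-- firstIndex via enumerate; `key=lambda c: firstIndex[c]` is only applied to contained keys,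
-- so `getD c 0` is exact there
def stringToKey_alt (value : String) : String :=
  let fi : PySem.Dict Char Int :=
    (PySem.List.enumerate value.toList).foldl
      (fun d p => if p.2 ∈ pvACC ∧ d.contains p.2 = false then d.insert p.2 p.1 else d)
      PySem.Dict.empty
  let seen := PySem.List.sorted (pvACC.filter (fun c => fi.contains c)) (fun c => fi.getD c 0) false
  let unseen := pvACC.filter (fun c => fi.contains c = false)
  String.mk (seen ++ unseen)

-- ===== PRECONDITION & SPEC =====
def Spec_stringToKey (value : String) (out : String) : Prop := out = stringToKey_alt value
instance (value : String) (out : String) : Decidable (Spec_stringToKey value out) := by unfold Spec_stringToKey; infer_instance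

-- ===== CLAIM (what is proved, stated in full; the proofs are below) =====
def Claim_equal_stringToKey : Prop := ∀ (value : String), Dom_stringToKey value → Spec_stringToKey value (stringToKey value)

-- ===== LEMMAS AND PROOFS =====

-- A's single-list accumulator fold
def stkStep (cl : List Char) (c : Char) : List Char :=
  if c ∈ pvACC ∧ c ∉ cl then cl ++ [c] else cl

-- A's paired fold keeps its two components equal
lemma stk_pair_eq (xs : List Char) (cl : List Char) :
    xs.foldl (fun (st : List Char × List Char) c =>
        if c ∈ pvACC ∧ c ∉ st.1 then (st.1 ++ [c], st.2 ++ [c]) else st) (cl, cl)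
      = (xs.foldl stkStep cl, xs.foldl stkStep cl) := by
  induction xs generalizing cl with
  | nil => rfl
  | cons x xs ih =>
    simp only [List.foldl_cons, stkStep]
    split_ifs with h <;> exact ih _

-- elements of A's accumulator come from the start value or pvACC
lemma stk_mem_pvACC (xs : List Char) (cl : List Char) :
    ∀ c ∈ xs.foldl stkStep cl, c ∈ cl ∨ c ∈ pvACC := by
  induction xs generalizing cl with
  | nil => intro c hc; exact Or.inl hc
  | cons x xs ih =>
    intro c hc
    rcases ih (stkStep cl x) c hc with h | h
    · unfold stkStep at h
      split_ifs at h with hx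
      · rcases List.mem_append.mp h with h | h
        · exact Or.inl h
        · exact Or.inr (by simpa using (List.mem_singleton.mp h) ▸ hx.1)
      · exact Or.inl h
    · exact Or.inr h

-- main simultaneous invariant: B's dict fold tracks A's accumulator fold
lemma stk_dict_inv (xs : List Char) (s : Int) (d : PySem.Dict Char Int)
    (hnd : d.keys.Nodup)
    (hpw : (d.items.map (·.2)).Pairwise (· < ·))
    (hlt : ∀ v ∈ d.items.map (·.2), v < s) :
    (((PySem.List.enumerate xs s).foldl
      (fun d p => if p.2 ∈ pvACC ∧ d.contains p.2 = false then d.insert p.2 p.1 else d) d).keys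
        = xs.foldl stkStep d.keys) ∧
    ((PySem.List.enumerate xs s).foldl
      (fun d p => if p.2 ∈ pvACC ∧ d.contains p.2 = false then d.insert p.2 p.1 else d) d).keys.Nodup ∧
    (((PySem.List.enumerate xs s).foldl
      (fun d p => if p.2 ∈ pvACC ∧ d.contains p.2 = false then d.insert p.2 p.1 else d) d).items.map (·.2)).Pairwise (· < ·) ∧
    (∀ v ∈ ((PySem.List.enumerate xs s).foldl
      (fun d p => if p.2 ∈ pvACC ∧ d.contains p.2 = false then d.insert p.2 p.1 else d) d).items.map (·.2), v < s + xs.length) := by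
  induction xs generalizing s d with
  | nil =>
    rw [PySem.List.enumerate_nil]
    exact ⟨rfl, hnd, hpw, by simpa using hlt⟩
  | cons x xs ih =>
    rw [PySem.List.enumerate_cons]
    simp only [List.foldl_cons, stkStep]
    have hcont : d.contains x = false ↔ x ∉ d.keys := by
      constructor
      · intro h hx
        exact absurd ((PySem.Dict.contains_iff_mem_keys d x).mpr hx) (by simp [h])
      · intro hx
        cases hc : d.contains x with
        | false => rfl
        | true => exact absurd ((PySem.Dict.contains_iff_mem_keys d x).mp hc) hx
    by_cases hx : x ∈ pvACC ∧ x ∉ d.keys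
    · have hcf : d.contains x = false := hcont.mpr hx.2
      rw [if_pos ⟨hx.1, hcf⟩, if_pos hx]
      have hkeys : (d.insert x s).keys = d.keys ++ [x] :=
        PySem.Dict.keys_insert_of_not_contains _ _ hcf
      have hitems : (d.insert x s).items = d.items ++ [(x, s)] :=
        PySem.Dict.items_insert_of_not_contains _ _ hcf
      have hnd' : (d.insert x s).keys.Nodup := by
        rw [hkeys]
        exact List.Nodup.append hnd (List.nodup_singleton x)
          (by simpa using fun h => hx.2 h)
      have hpw' : ((d.insert x s).items.map (·.2)).Pairwise (· < ·) := by
        rw [hitems, List.map_append]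
        refine List.pairwise_append.mpr ⟨hpw, by simp, ?_⟩
        intro a ha b hb
        simp only [List.map_cons, List.map_nil, List.mem_singleton] at hb
        subst hb
        exact hlt a ha
      have hlt' : ∀ v ∈ (d.insert x s).items.map (·.2), v < s + 1 := by
        rw [hitems, List.map_append]
        intro v hv
        rcases List.mem_append.mp hv with h | h
        · exact lt_trans (hlt v h) (by omega)
        · simp only [List.map_cons, List.map_nil, List.mem_singleton] at h
          omega
      have := ih (s + 1) (d.insert x s) hnd' hpw' hlt'
      refine ⟨by rw [this.1, hkeys], this.2.1, this.2.2.1, ?_⟩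
      intro v hv
      have := this.2.2.2 v hv
      simp only [List.length_cons]
      push_cast
      omega
    · have : ¬ (x ∈ pvACC ∧ d.contains x = false) := by
        intro h; exact hx ⟨h.1, hcont.mp h.2⟩
      rw [if_neg this, if_neg hx]
      have hlt' : ∀ v ∈ d.items.map (·.2), v < s + 1 := fun v hv => lt_trans (hlt v hv) (by omega)
      have := ih (s + 1) d hnd hpw hlt'
      refine ⟨this.1, this.2.1, this.2.2.1, ?_⟩
      intro v hv
      have := this.2.2.2 v hv
      simp only [List.length_cons]
      push_cast
      omega

lemma pvACC_nodup : pvACC.Nodup := by decide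

-- ===== VERDICT (by name: the statement is the Claim_ definition above) =====
theorem stringToKey_spec : Claim_equal_stringToKey := by
  intro value _
  unfold Spec_stringToKey stringToKey stringToKey_alt
  -- name the two sides' folds
  set fi : PySem.Dict Char Int :=
    (PySem.List.enumerate value.toList).foldl
      (fun d p => if p.2 ∈ pvACC ∧ d.contains p.2 = false then d.insert p.2 p.1 else d)
      PySem.Dict.empty with hfi
  have hinv := stk_dict_inv value.toList 0 PySem.Dict.empty (by simp)
    (by simp [PySem.Dict.empty]) (by simp [PySem.Dict.empty])
  rw [← hfi] at hinv
  obtain ⟨hkeys, hnd, hpw, -⟩ := hinv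
  simp only [PySem.Dict.keys_empty] at hkeys
  set cl := value.toList.foldl stkStep [] with hcl
  -- A's pair fold
  have hpair := stk_pair_eq value.toList []
  rw [← hcl] at hpair
  rw [hpair]
  -- contains ↔ membership in cl
  have hcmem : ∀ c, fi.contains c = true ↔ c ∈ cl := by
    intro c
    rw [PySem.Dict.contains_iff_mem_keys fi c, hkeys]
  -- seen part: sorted by first index = cl
  have hsub : ∀ c ∈ cl, c ∈ pvACC := by
    intro c hc
    rcases stk_mem_pvACC value.toList [] c (hcl ▸ hc) with h | h
    · simp at h
    · exact h
  have hperm : cl.Perm (pvACC.filter (fun c => fi.contains c)) := by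
    rw [List.perm_ext_iff_of_nodup (hkeys ▸ hnd) (List.Nodup.filter _ pvACC_nodup)]
    intro a
    simp only [List.mem_filter]
    constructor
    · intro ha; exact ⟨hsub a ha, (hcmem a).mpr ha⟩
    · intro ha; exact (hcmem a).mp ha.2
  have hclpw : cl.Pairwise (fun a b => fi.getD a 0 < fi.getD b 0) := by
    have hitems : fi.items.Pairwise (fun p q => p.2 < q.2) := by
      rw [← List.pairwise_map]; exact hpw
    have : fi.items.Pairwise (fun p q => fi.getD p.1 0 < fi.getD q.1 0) := by
      refine hitems.imp_of_mem ?_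
      intro p q hp hq h
      have hp' : (p.1, p.2) ∈ fi.items := by rw [Prod.mk.eta]; exact hp
      have hq' : (q.1, q.2) ∈ fi.items := by rw [Prod.mk.eta]; exact hq
      rw [PySem.Dict.getD_of_mem_items fi hp' hnd, PySem.Dict.getD_of_mem_items fi hq' hnd]
      exact h
    have hmap : (fi.items.map (·.1)).Pairwise (fun a b => fi.getD a 0 < fi.getD b 0) := by
      rw [List.pairwise_map]; exact this
    have : fi.keys = fi.items.map (·.1) := rfl
    rw [← hkeys, this]
    exact hmap
  have hseen : PySem.List.sorted (pvACC.filter (fun c => fi.contains c))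
      (fun c => fi.getD c 0) false = cl :=
    PySem.List.sorted_eq_of_perm_of_pairwise_lt _ _ _ hperm hclpw
  -- unseen part: A's second fold = cl ++ filter
  have hsecond : pvACC.foldl (fun k c => if c ∈ cl then k else k ++ [c]) cl
      = cl ++ pvACC.filter (fun c => fi.contains c = false) := by
    have h1 : pvACC.foldl (fun k c => if c ∈ cl then k else k ++ [c]) cl
        = pvACC.foldl (fun k c => if c ∉ cl then k ++ [c] else k) cl := by
      apply PySem.List.foldl_congr_mem
      intro acc x _
      by_cases hx : x ∈ cl <;> simp [hx]
    rw [h1, PySem.List.foldl_append_ite_eq_filter]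
    congr 1
    apply List.filter_congr
    intro c _
    by_cases hc : c ∈ cl
    · simp [(hcmem c).mpr hc, hc]
    · have : fi.contains c = false := by
        cases h : fi.contains c with
        | false => rfl
        | true => exact absurd ((hcmem c).mp h) hc
      simp [this, hc]
  simp only [hseen, hsecond]
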